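-- pv_equiv track=rewrite | github.com/Pr1d3-glitch/100M-password-Generator | passgen.py | case_variants
-- ===== SOURCE A (Python) =====
-- import itertools
--
-- def case_variants(word):
--     pools = []
--     for char in word:
--         if char.isalpha():
--             pools.append([char.lower(), char.upper()])
--         else:
--             pools.append([char])
--     for combo in itertools.product(*pools):
--         yield ''.join(combo)
-- ===== SOURCE B (Python) =====
-- def case_variants(word):
--     # Recursive generator: same values in the same order as A, no itertools.
--     if not word:
--         yield ''
--         return
--     c = word[0]
--     opts = [c.lower(), c.upper()] if c.isalpha() else [c]
--     tails = list(case_variants(word[1:]))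
--     for o in opts:
--         for t in tails:
--             yield o + t
-- ===== Notes on version B (the rewrite author's own statement) =====
-- stated objective: alternative
-- what changed: Replaces the pools-list plus itertools.product pipeline with a direct recursive generator on the first character and the recursively generated tail variants.
import Mathlib
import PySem

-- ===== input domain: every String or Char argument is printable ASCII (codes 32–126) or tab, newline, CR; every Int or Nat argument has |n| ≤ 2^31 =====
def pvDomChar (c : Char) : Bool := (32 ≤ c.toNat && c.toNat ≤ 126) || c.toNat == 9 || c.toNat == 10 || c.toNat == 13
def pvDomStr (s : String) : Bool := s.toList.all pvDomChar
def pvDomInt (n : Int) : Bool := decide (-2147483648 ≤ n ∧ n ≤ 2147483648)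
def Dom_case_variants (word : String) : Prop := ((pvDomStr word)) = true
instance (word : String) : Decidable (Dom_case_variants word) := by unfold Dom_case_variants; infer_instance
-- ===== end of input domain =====

-- B replaces A's pools + itertools.product pipeline with a direct recursion on the
-- first character (alternative decomposition; same values, same order, same cost).

-- ===== PORT A =====
-- hand port of itertools.product over a list of pools (exact: left-fold, each step
-- extends every existing combo with every element of the next pool, last pool fastest)
def pyProduct (pools : List (List Char)) : List (List Char) :=
  pools.foldl (fun acc pool => acc.flatMap (fun combo => pool.map (fun c => combo ++ [c]))) [[]]

def case_variants (word : String) : List String :=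
  let pools : List (List Char) :=
    word.toList.foldl (fun pools c =>
      pools ++ [if PySem.Chars.isalpha c then [PySem.Chars.lowerChar c, PySem.Chars.upperChar c] else [c]]) []
  (pyProduct pools).map String.ofList  -- ''.join(combo) for each combo, in product order

-- ===== PORT B =====
def altGo : List Char → List String
  | [] => [""]
  | c :: rest =>
    (if PySem.Chars.isalpha c then
        [String.ofList [PySem.Chars.lowerChar c], String.ofList [PySem.Chars.upperChar c]]
      else [String.ofList [c]]).flatMap
      (fun o => (altGo rest).map (fun t => o ++ t))

def case_variants_alt (word : String) : List String := altGo word.toList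

-- ===== PRECONDITION & SPEC =====
def Spec_case_variants (word : String) (out : List String) : Prop := out = case_variants_alt word
instance (word : String) (out : List String) : Decidable (Spec_case_variants word out) := by unfold Spec_case_variants; infer_instance

-- ===== CLAIM (what is proved, stated in full; the proofs are below) =====
def Claim_equal_case_variants : Prop := ∀ (word : String), Dom_case_variants word → Spec_case_variants word (case_variants word)

-- ===== LEMMAS AND PROOFS =====
def charOpts (c : Char) : List Char :=
  if PySem.Chars.isalpha c then [PySem.Chars.lowerChar c, PySem.Chars.upperChar c] else [c]

-- right-to-left (recursive) cartesian product
def prodR : List (List Char) → List (List Char)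
  | [] => [[]]
  | p :: ps => p.flatMap (fun c => (prodR ps).map (fun t => c :: t))

theorem ofList_append (a b : List Char) :
    String.ofList a ++ String.ofList b = String.ofList (a ++ b) := by simp

theorem ofList_single_append (c : Char) (l : List Char) :
    String.ofList [c] ++ String.ofList l = String.ofList (c :: l) := by
  rw [ofList_append, List.singleton_append]

theorem pools_eq (l : List Char) (acc : List (List Char)) :
    l.foldl (fun pools c => pools ++
        [if PySem.Chars.isalpha c then [PySem.Chars.lowerChar c, PySem.Chars.upperChar c] else [c]]) acc
      = acc ++ l.map charOpts := by
  induction l generalizing acc with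
  | nil => simp
  | cons c l ih => simp [List.foldl_cons, ih, charOpts]

theorem pyProduct_foldl (ps : List (List Char)) (acc : List (List Char)) :
    ps.foldl (fun acc pool => acc.flatMap (fun combo => pool.map (fun c => combo ++ [c]))) acc
      = acc.flatMap (fun pre => (prodR ps).map (fun t => pre ++ t)) := by
  induction ps generalizing acc with
  | nil => simp [prodR]
  | cons p ps ih =>
    simp only [List.foldl_cons, ih, prodR, List.flatMap_assoc]
    refine List.flatMap_congr ?_
    intro x _
    rw [List.flatMap_map, List.map_flatMap]
    refine List.flatMap_congr ?_
    intro c _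
    simp [List.map_map, Function.comp_def, List.append_assoc]

theorem pyProduct_eq_prodR (ps : List (List Char)) : pyProduct ps = prodR ps := by
  simp [pyProduct, pyProduct_foldl]

theorem altGo_eq (l : List Char) :
    altGo l = (prodR (l.map charOpts)).map String.ofList := by
  induction l with
  | nil => simp [altGo, prodR]
  | cons c l ih =>
    simp only [altGo, ih, List.map_cons, prodR, List.map_flatMap, List.map_map, charOpts]
    split_ifs <;> simp [List.flatMap_cons, Function.comp_def, ofList_single_append]

-- ===== VERDICT (by name: the statement is the Claim_ definition above) =====
theorem case_variants_spec : Claim_equal_case_variants := by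
  intro word _
  show case_variants word = case_variants_alt word
  simp only [case_variants, case_variants_alt]
  rw [pools_eq, List.nil_append, pyProduct_eq_prodR, altGo_eq]
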